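-- pv_equiv track=rewrite | github.com/mengyx-work/CS_algorithm_scripts | leetcode/LC_378_Kth_Smallest_Element_in_Sorted_Matrix.py | countByUpperBound
-- ===== SOURCE A (Python) =====
-- def countByUpperBound(matrix, upperBound):
--     '''count the number of element euqal or
--     smaller than the target value
--     '''
--     counter = 0
--     n = len(matrix)
--     for i in range(n):
--         j = n - 1
--         while(j >= 0 and matrix[i][j] > upperBound):
--             j -= 1
--         counter += j + 1
--     return counter
-- ===== SOURCE B (Python) =====
-- def countByUpperBound(matrix, upperBound):
--     n = len(matrix)
--     active = list(range(n))  # rows whose scanned suffix so far is all > upperBound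
--     total = 0
--     for j in range(n - 1, -1, -1):  # columns right to left
--         remaining = []
--         for i in active:
--             if matrix[i][j] <= upperBound:
--                 total += j + 1
--             else:
--                 remaining.append(i)
--         active = remaining
--     return total
-- ===== Notes on version B (the rewrite author's own statement) =====
-- stated objective: alternative
-- what changed: Replaces A's row-major backward while-scan per row with a column-major sweep from the rightmost column to the left that maintains a shrinking set of still-active rows: a row is retired (and contributes j+1) at the first column j where its value drops to <= upperBound, so the per-row index scan disappears entirely.
import Mathlib
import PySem

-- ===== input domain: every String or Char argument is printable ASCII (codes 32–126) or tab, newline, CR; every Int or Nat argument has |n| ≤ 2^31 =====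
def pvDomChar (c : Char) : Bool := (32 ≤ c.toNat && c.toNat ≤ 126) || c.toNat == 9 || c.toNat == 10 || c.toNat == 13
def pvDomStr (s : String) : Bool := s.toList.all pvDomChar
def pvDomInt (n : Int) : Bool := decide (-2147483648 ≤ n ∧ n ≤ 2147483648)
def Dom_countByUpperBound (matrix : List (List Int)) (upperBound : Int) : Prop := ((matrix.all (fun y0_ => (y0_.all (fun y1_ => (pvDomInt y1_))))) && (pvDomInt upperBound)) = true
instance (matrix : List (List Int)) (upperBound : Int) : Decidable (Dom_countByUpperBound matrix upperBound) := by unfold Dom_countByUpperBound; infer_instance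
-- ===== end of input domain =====

-- B replaces A's row-major backward while-scan with a column-major right-to-left sweep
-- maintaining a shrinking set of still-active rows (alternative, same cost; return value only).
-- A raises IndexError when some row is shorter than len(matrix); Pre_ excludes exactly that.


-- ===== PORT A =====
-- inner while loop: argument k = j + 1 (number of still-candidate columns); result is final j + 1
def loopA (row : List Int) (upperBound : Int) : Nat → Int
  | 0 => 0
  | k + 1 =>
    if PySem.List.pyGetD row (k : Int) 0 > upperBound then loopA row upperBound k
    else (k : Int) + 1

def countByUpperBound (matrix : List (List Int)) (upperBound : Int) : Int :=
  let n := matrix.length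
  (PySem.List.pyRange 0 (n : Int) 1).foldl
    (fun counter i => counter + loopA (PySem.List.pyGetD matrix i []) upperBound n) 0

-- ===== PORT B =====
-- one column j: retire each active row whose entry at column j is <= upperBound (it contributes j+1),
-- keep the rest in 'remaining'
def colStep (matrix : List (List Int)) (upperBound : Int) (st : Int × List Int) (j : Int) : Int × List Int :=
  st.2.foldl
    (fun acc i =>
      if PySem.List.pyGetD (PySem.List.pyGetD matrix i []) j 0 ≤ upperBound
      then (acc.1 + (j + 1), acc.2)
      else (acc.1, acc.2 ++ [i]))
    (st.1, [])

def countByUpperBound_alt (matrix : List (List Int)) (upperBound : Int) : Int :=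
  let n := matrix.length
  ((PySem.List.pyRange ((n : Int) - 1) (-1) (-1)).foldl (colStep matrix upperBound)
    (0, PySem.List.pyRange 0 (n : Int) 1)).1

-- ===== PRECONDITION & SPEC =====
-- A indexes matrix[i][n-1] with n = len(matrix), so it raises IndexError on any row shorter than n;
-- Pre_ excludes exactly those inputs.
def Pre_countByUpperBound (matrix : List (List Int)) (upperBound : Int) : Prop :=
  ∀ row ∈ matrix, matrix.length ≤ row.length
instance (matrix : List (List Int)) (upperBound : Int) : Decidable (Pre_countByUpperBound matrix upperBound) := by unfold Pre_countByUpperBound; infer_instance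

def pvWitness_countByUpperBound : List (List Int) × Int := ([[1, 3], [2, 4]], 2)

def Spec_countByUpperBound (matrix : List (List Int)) (upperBound : Int) (out : Int) : Prop := out = countByUpperBound_alt matrix upperBound
instance (matrix : List (List Int)) (upperBound : Int) (out : Int) : Decidable (Spec_countByUpperBound matrix upperBound out) := by unfold Spec_countByUpperBound; infer_instance

-- ===== CLAIM (what is proved, stated in full; the proofs are below) =====
def Claim_equal_countByUpperBound : Prop := ∀ (matrix : List (List Int)) (upperBound : Int), Dom_countByUpperBound matrix upperBound → Pre_countByUpperBound matrix upperBound → Spec_countByUpperBound matrix upperBound (countByUpperBound matrix upperBound)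

-- ===== LEMMAS AND PROOFS =====

-- last index of a value ≤ upperBound (proof-side characterisation of one row's contribution)
def rowLastB (row : List Int) (upperBound : Int) : Int :=
  (PySem.List.enumerate row 0).foldl
    (fun last iv => if iv.2 ≤ upperBound then iv.1 else last) (-1)

theorem enumerate_append_singleton {α : Type} (xs : List α) (x : α) (s : Int) :
    PySem.List.enumerate (xs ++ [x]) s
      = PySem.List.enumerate xs s ++ [((s + xs.length : Int), x)] := by
  induction xs generalizing s with
  | nil => simp [PySem.List.enumerate_cons, PySem.List.enumerate_nil]
  | cons y ys ih =>
      simp [PySem.List.enumerate_cons, ih]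
      ring_nf

theorem rowLastB_append_singleton (xs : List Int) (x ub : Int) :
    rowLastB (xs ++ [x]) ub
      = if x ≤ ub then (xs.length : Int) else rowLastB xs ub := by
  unfold rowLastB
  rw [enumerate_append_singleton, List.foldl_append]
  simp

-- A's inner while loop computes 1 + (last index ≤ ub) on the row prefix of length k
theorem row_eq (row : List Int) (ub : Int) :
    ∀ k : Nat, k ≤ row.length → loopA row ub k = rowLastB (row.take k) ub + 1 := by
  intro k
  induction k with
  | zero => intro _; simp [loopA, rowLastB, PySem.List.enumerate_nil]
  | succ k ih =>
      intro hk
      have hklt : k < row.length := by omega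
      have htake : row.take (k + 1) = row.take k ++ [row[k]] := by
        rw [List.take_add_one]
        simp [List.getElem?_eq_getElem hklt]
      have hget : PySem.List.pyGetD row (k : Int) 0 = row[k] := by
        rw [PySem.List.pyGetD_natCast]
        simp [List.getD, List.getElem?_eq_getElem hklt]
      rw [htake, rowLastB_append_singleton]
      have hlen : ((row.take k).length : Int) = (k : Int) := by
        simp [List.length_take, Nat.min_eq_left (le_of_lt hklt)]
      simp only [loopA, hget, hlen]
      split_ifs with h1 h2
      · omega
      · exact ih (by omega)
      · rfl
      · omega

theorem fold_eq (ub : Int) (n : Nat) :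
    ∀ (matrix : List (List Int)) (init : Int), (∀ row ∈ matrix, n ≤ row.length) →
      matrix.foldl (fun counter row => counter + loopA row ub n) init
        = matrix.foldl (fun total row => total + (rowLastB (row.take n) ub + 1)) init := by
  intro matrix
  induction matrix with
  | nil => intro _ _; rfl
  | cons r rs ih =>
      intro init h
      simp only [List.foldl_cons]
      rw [row_eq r ub n (h r (by simp))]
      exact ih _ (fun row hm => h row (by simp [hm]))

-- the condition tested by B at column j for row index i
def condB (matrix : List (List Int)) (ub j i : Int) : Bool :=
  decide (PySem.List.pyGetD (PySem.List.pyGetD matrix i []) j 0 ≤ ub)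

-- B's inner loop over the active rows, characterised
theorem colStep_inner (matrix : List (List Int)) (ub j : Int) :
    ∀ (act : List Int) (t : Int) (rem : List Int),
      act.foldl
        (fun acc i =>
          if PySem.List.pyGetD (PySem.List.pyGetD matrix i []) j 0 ≤ ub
          then (acc.1 + (j + 1), acc.2)
          else (acc.1, acc.2 ++ [i]))
        (t, rem)
      = (t + (j + 1) * (act.countP (condB matrix ub j)),
         rem ++ act.filter (fun i => ! condB matrix ub j i)) := by
  intro act
  induction act with
  | nil => intro t rem; simp
  | cons i is ih =>
      intro t rem
      simp only [List.foldl_cons]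
      by_cases h : PySem.List.pyGetD (PySem.List.pyGetD matrix i []) j 0 ≤ ub
      · rw [if_pos h, ih]
        have hc : condB matrix ub j i = true := by simp [condB, h]
        simp [hc, Prod.ext_iff]
        ring
      · rw [if_neg h, ih]
        have hc : condB matrix ub j i = false := by simp [condB, h]
        simp [hc]

theorem colStep_eq (matrix : List (List Int)) (ub j t : Int) (act : List Int) :
    colStep matrix ub (t, act) j
      = (t + (j + 1) * (act.countP (condB matrix ub j)),
         act.filter (fun i => ! condB matrix ub j i)) := by
  unfold colStep
  rw [colStep_inner]
  simp

-- splitting a sum over a list by a boolean condition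
theorem sum_split (c : Int → Bool) (v : Int) (f g : Int → Int) :
    ∀ (act : List Int), (∀ i ∈ act, f i = if c i then v else g i) →
      (act.map f).sum
        = v * (act.countP c) + ((act.filter (fun i => ! c i)).map g).sum := by
  intro act
  induction act with
  | nil => intro _; simp
  | cons i is ih =>
      intro h
      have hi := h i (by simp)
      simp only [List.map_cons, List.sum_cons, List.countP_cons, List.filter_cons]
      rw [ih (fun x hx => h x (by simp [hx]))]
      by_cases hc : c i = true
      · simp [hc, hi]; ring
      · simp [hc, hi]; ring

-- outer loop invariant: after sweeping columns m-1 .. 0 (foldr over range 0 m),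
-- the total grows by each active row's contribution restricted to its first m columns
theorem outer_inv (matrix : List (List Int)) (ub : Int) :
    ∀ (m : Nat) (t : Int) (act : List Int),
      (∀ i ∈ act, 0 ≤ i ∧ i < (matrix.length : Int) ∧
        m ≤ (PySem.List.pyGetD matrix i []).length) →
      ((PySem.List.pyRange 0 (m : Int) 1).foldr
          (fun j st => colStep matrix ub st j) (t, act)).1
        = t + (act.map
            (fun i => rowLastB ((PySem.List.pyGetD matrix i []).take m) ub + 1)).sum := by
  intro m
  induction m with
  | zero =>
      intro t act _
      rw [PySem.List.pyRange_one_eq_nil (by omega)]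
      simp [rowLastB, PySem.List.enumerate_nil]
  | succ m ih =>
      intro t act h
      have hrng : PySem.List.pyRange 0 ((m : Int) + 1) 1
          = PySem.List.pyRange 0 (m : Int) 1 ++ [(m : Int)] :=
        PySem.List.pyRange_one_succ_right (by omega)
      rw [show ((m + 1 : Nat) : Int) = (m : Int) + 1 by push_cast; ring, hrng,
        List.foldr_append]
      simp only [List.foldr_cons, List.foldr_nil]
      rw [colStep_eq, ih]
      · rw [sum_split (condB matrix ub (m : Int)) ((m : Int) + 1)
              (fun i => rowLastB ((PySem.List.pyGetD matrix i []).take (m + 1)) ub + 1)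
              (fun i => rowLastB ((PySem.List.pyGetD matrix i []).take m) ub + 1)
              act ?_]
        · ring
        · intro i hi
          beta_reduce
          obtain ⟨h0, _, hlen⟩ := h i hi
          set row := PySem.List.pyGetD matrix i [] with hrow
          have hm : m < row.length := by omega
          have htake : row.take (m + 1) = row.take m ++ [row[m]] := by
            rw [List.take_add_one]; simp [List.getElem?_eq_getElem hm]
          have hget : PySem.List.pyGetD row (m : Int) 0 = row[m] := by
            rw [PySem.List.pyGetD_natCast]
            simp [List.getD, List.getElem?_eq_getElem hm]
          have hlent : ((row.take m).length : Int) = (m : Int) := by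
            simp [List.length_take, Nat.min_eq_left (le_of_lt hm)]
          rw [htake, rowLastB_append_singleton, hlent]
          have hcond : condB matrix ub (m : Int) i = decide (row[m] ≤ ub) := by
            simp only [condB, ← hrow, hget]
          rw [hcond]
          by_cases hle : row[m] ≤ ub
          · simp [hle]
          · simp [hle]
      · intro i hi
        have := h i (List.mem_of_mem_filter hi)
        exact ⟨this.1, this.2.1, by omega⟩

theorem countByUpperBound_spec : Claim_equal_countByUpperBound := by
  intro matrix ub _ hpre
  show countByUpperBound matrix ub = countByUpperBound_alt matrix ub
  -- A's side: fold over the matrix of per-row contributions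
  have hA : countByUpperBound matrix ub
      = matrix.foldl
          (fun total row => total + (rowLastB (row.take matrix.length) ub + 1)) 0 := by
    show (PySem.List.pyRange 0 (matrix.length : Int) 1).foldl
        (fun counter i => counter + loopA (PySem.List.pyGetD matrix i []) ub matrix.length) 0
      = _
    rw [PySem.List.foldl_pyRange_zero_pyGetD' matrix []
        (fun counter row => counter + loopA row ub matrix.length) 0]
    exact fold_eq ub matrix.length matrix 0 hpre
  -- B's side: countdown fold = foldr over the increasing range, then the invariant
  have hrev : PySem.List.pyRange ((matrix.length : Int) - 1) (-1) (-1)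
      = (PySem.List.pyRange 0 (matrix.length : Int) 1).reverse := by
    rw [PySem.List.pyRange_neg_one_eq_reverse]
    norm_num
  have hB : countByUpperBound_alt matrix ub
      = ((PySem.List.pyRange 0 (matrix.length : Int) 1).map
          (fun i => rowLastB ((PySem.List.pyGetD matrix i []).take matrix.length) ub + 1)).sum := by
    show ((PySem.List.pyRange ((matrix.length : Int) - 1) (-1) (-1)).foldl
        (colStep matrix ub) (0, PySem.List.pyRange 0 (matrix.length : Int) 1)).1 = _
    rw [hrev, List.foldl_reverse]
    have := outer_inv matrix ub matrix.length 0
        (PySem.List.pyRange 0 (matrix.length : Int) 1) ?_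
    · simpa using this
    · intro i hi
      have hmem := (PySem.List.mem_pyRange_one).mp hi
      refine ⟨hmem.1, hmem.2, ?_⟩
      have hrow : PySem.List.pyGetD matrix i [] = matrix[i.toNat] :=
        PySem.List.pyGetD_eq_getElem matrix [] hmem.1 hmem.2
      rw [hrow]
      exact hpre _ (List.getElem_mem _)
  -- convert the indexed sum into the fold over the matrix
  have h2 := congrArg (List.map (fun row => rowLastB (row.take matrix.length) ub + 1))
      (PySem.List.map_pyGetD_pyRange_zero' matrix [])
  rw [List.map_map] at h2
  simp only [Function.comp_def] at h2
  rw [hA, hB, PySem.List.foldl_add, ← h2]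
  omega
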